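-- pv_equiv track=rewrite | github.com/gurmehakk/DCLL-NEW | hangman/gru_trans.py | _find_consonant_clusters
-- ===== SOURCE A (Python) =====
-- def _find_consonant_clusters(word):
--     """Find consonant clusters in word"""
--     clusters = []
--     vowels = set('aeiou')
--     current_cluster = []
--
--     for char in word:
--         if char not in vowels:
--             current_cluster.append(char)
--         else:
--             if len(current_cluster) >= 2:
--                 clusters.append(''.join(current_cluster))
--             current_cluster = []
--
--     if len(current_cluster) >= 2:
--         clusters.append(''.join(current_cluster))
--
--     return clusters
-- ===== SOURCE B (Python) =====
-- def _find_consonant_clusters(word):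
--     """Find consonant clusters in word"""
--     vowels = set('aeiou')
--     # Mark every vowel with a sentinel, then split on it: the consonant runs
--     # fall out as segments; keep those of length >= 2.
--     marked = ''.join('\x00' if c in vowels else c for c in word)
--     return [run for run in marked.split('\x00') if len(run) >= 2]
-- ===== Notes on version B (the rewrite author's own statement) =====
-- stated objective: alternative
-- what changed: Replaces the flush-on-vowel accumulator loop with a segment-then-filter pass: vowels are replaced by a sentinel character, the string is split on it, and segments of length >= 2 are kept.
import Mathlib
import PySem

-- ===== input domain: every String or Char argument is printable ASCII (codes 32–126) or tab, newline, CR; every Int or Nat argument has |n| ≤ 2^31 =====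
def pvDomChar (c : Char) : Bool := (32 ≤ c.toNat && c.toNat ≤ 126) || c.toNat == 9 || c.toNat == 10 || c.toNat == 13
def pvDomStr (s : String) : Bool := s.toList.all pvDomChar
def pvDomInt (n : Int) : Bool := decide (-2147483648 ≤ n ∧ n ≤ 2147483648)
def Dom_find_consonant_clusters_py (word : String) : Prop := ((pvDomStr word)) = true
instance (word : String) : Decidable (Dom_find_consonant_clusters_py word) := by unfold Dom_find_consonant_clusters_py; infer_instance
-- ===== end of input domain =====

-- B replaces A's flush-on-vowel accumulator with a segment-then-filter pass (same cost, alternative algorithm).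

-- ===== PORT A =====
def pvLoopA : List Char → List String → List Char → List String
  | [], clusters, cur => if 2 ≤ cur.length then clusters ++ [String.mk cur] else clusters
  | c :: cs, clusters, cur =>
    if (['a','e','i','o','u'].contains c) = false then
      pvLoopA cs clusters (cur ++ [c])
    else
      pvLoopA cs (if 2 ≤ cur.length then clusters ++ [String.mk cur] else clusters) []

def find_consonant_clusters_py (word : String) : List String :=
  pvLoopA word.toList [] []

-- ===== PORT B =====
def pvMark (c : Char) : Char := if ['a','e','i','o','u'].contains c then '\x00' else c

-- hand port of str.split(sep) for the single-character separator '\x00'; exact: Python's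
-- split on a nonempty sep yields the (possibly empty) segments between occurrences.
def pvSplit0 : List Char → List (List Char)
  | [] => [[]]
  | c :: cs =>
    if c = '\x00' then [] :: pvSplit0 cs
    else
      match pvSplit0 cs with
      | [] => [[c]]
      | r :: rs => (c :: r) :: rs

def find_consonant_clusters_py_alt (word : String) : List String :=
  ((pvSplit0 (word.toList.map pvMark)).filter (fun r => 2 ≤ r.length)).map String.mk

-- ===== PRECONDITION & SPEC =====
def Spec_find_consonant_clusters_py (word : String) (out : List String) : Prop := out = find_consonant_clusters_py_alt word
instance (word : String) (out : List String) : Decidable (Spec_find_consonant_clusters_py word out) := by unfold Spec_find_consonant_clusters_py; infer_instance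

-- ===== CLAIM (what is proved, stated in full; the proofs are below) =====
def Claim_equal_find_consonant_clusters_py : Prop := ∀ (word : String), Dom_find_consonant_clusters_py word → Spec_find_consonant_clusters_py word (find_consonant_clusters_py word)

-- ===== LEMMAS AND PROOFS =====

lemma pvSplit0_ne_nil (l : List Char) : pvSplit0 l ≠ [] := by
  cases l with
  | nil => simp [pvSplit0]
  | cons c cs =>
    simp only [pvSplit0]
    split
    · simp
    · cases h : pvSplit0 cs <;> simp

lemma pvKey : ∀ (cs : List Char) (clusters : List String) (cur r : List Char) (rs : List (List Char)),
    (∀ c ∈ cs, pvDomChar c = true) →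
    pvSplit0 (cs.map pvMark) = r :: rs →
    pvLoopA cs clusters cur =
      clusters ++ ((((cur ++ r) :: rs).filter (fun r => 2 ≤ r.length)).map String.mk) := by
  intro cs
  induction cs with
  | nil =>
    intro clusters cur r rs _ hsplit
    simp only [List.map_nil, pvSplit0] at hsplit
    injection hsplit with h1 h2
    subst h1; subst h2
    simp only [pvLoopA, List.append_nil, List.filter_cons]
    split_ifs with h <;> simp_all <;> omega
  | cons c cs ih =>
    intro clusters cur r rs hdom hsplit
    have hdomc : pvDomChar c = true := hdom c (by simp)
    have hdom' : ∀ x ∈ cs, pvDomChar x = true := fun x hx => hdom x (by simp [hx])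
    obtain ⟨r', rs', h'⟩ : ∃ r' rs', pvSplit0 (cs.map pvMark) = r' :: rs' := by
      cases h : pvSplit0 (cs.map pvMark) with
      | nil => exact absurd h (pvSplit0_ne_nil _)
      | cons a b => exact ⟨a, b, rfl⟩
    by_cases hv : (['a','e','i','o','u'].contains c) = true
    · -- vowel: pvMark c = '\x00', A flushes the current cluster
      have hm : pvMark c = '\x00' := by unfold pvMark; rw [if_pos hv]
      simp only [List.map_cons, hm, pvSplit0, if_pos rfl, h'] at hsplit
      injection hsplit with h1 h2
      subst h1; subst h2
      simp only [pvLoopA, hv, Bool.true_eq_false, if_false]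
      rw [ih _ [] r' rs' hdom' h']
      simp only [List.nil_append, List.append_nil, List.filter_cons]
      split_ifs with h1 <;> simp_all [List.append_assoc] <;> omega
    · -- consonant: pvMark c = c (and c ≠ '\x00' inside the domain)
      have hne : c ≠ '\x00' := by
        intro hc; subst hc; simp [pvDomChar] at hdomc
      have hv' : (['a','e','i','o','u'].contains c) = false := by simpa using hv
      have hm : pvMark c = c := by unfold pvMark; rw [if_neg hv]
      simp only [List.map_cons, hm, pvSplit0, if_neg hne, h'] at hsplit
      injection hsplit with h1 h2
      subst h1; subst h2
      rw [pvLoopA, if_pos hv', ih _ (cur ++ [c]) r' rs' hdom' h']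
      simp [List.append_assoc]

-- ===== VERDICT (by name: the statement is the Claim_ definition above) =====
theorem find_consonant_clusters_py_spec : Claim_equal_find_consonant_clusters_py := by
  intro word hdom
  unfold Spec_find_consonant_clusters_py find_consonant_clusters_py find_consonant_clusters_py_alt
  obtain ⟨r, rs, h⟩ : ∃ r rs, pvSplit0 (word.toList.map pvMark) = r :: rs := by
    cases h : pvSplit0 (word.toList.map pvMark) with
    | nil => exact absurd h (pvSplit0_ne_nil _)
    | cons a b => exact ⟨a, b, rfl⟩
  have hdom' : ∀ c ∈ word.toList, pvDomChar c = true := by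
    have := hdom
    simp only [Dom_find_consonant_clusters_py, pvDomStr, List.all_eq_true] at this
    exact this
  rw [pvKey word.toList [] [] r rs hdom' h, h]
  simp
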